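-- pv_equiv track=rewrite | github.com/brage-andreas/tdt4145 | src/python/task_8.py | get_all_seats_from_configuration
-- ===== SOURCE A (Python) =====
-- def get_all_seats_from_configuration(configuration):
--     SEAT_GROUP_DIVIDER = "-"
--     UNAVAILABLE_SEAT = "*"
--     result = []
--
--     rows = configuration.split("|")
--
--     for row_number, seat_row in enumerate(rows, start=1):
--         clean_seats = seat_row.replace(SEAT_GROUP_DIVIDER, "").replace(UNAVAILABLE_SEAT, "")
--
--         for seat in clean_seats:
--             result.append(f"{row_number}{seat}")
--
--     return result
-- ===== SOURCE B (Python) =====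
-- def get_all_seats_from_configuration(configuration):
--     result = []
--     row = 1
--     for char in configuration:
--         if char == "|":
--             row += 1
--         elif char not in "-*":
--             result.append(f"{row}{char}")
--     return result
-- ===== Notes on version B (the rewrite author's own statement) =====
-- stated objective: simpler
-- what changed: Replaces the split-then-per-row replace/inner loop with one flat scan over the raw string keeping an integer row counter.
import Mathlib
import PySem

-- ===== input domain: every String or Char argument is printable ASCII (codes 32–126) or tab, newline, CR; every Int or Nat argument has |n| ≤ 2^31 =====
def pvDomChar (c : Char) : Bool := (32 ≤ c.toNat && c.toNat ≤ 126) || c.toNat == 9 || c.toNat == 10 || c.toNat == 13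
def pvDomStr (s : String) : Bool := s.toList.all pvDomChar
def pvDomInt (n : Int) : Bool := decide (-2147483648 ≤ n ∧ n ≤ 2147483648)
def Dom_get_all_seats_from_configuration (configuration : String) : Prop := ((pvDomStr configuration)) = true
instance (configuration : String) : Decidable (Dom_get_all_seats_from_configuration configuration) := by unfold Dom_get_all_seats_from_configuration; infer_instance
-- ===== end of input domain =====

-- B replaces A's split('|')-then-inner-loop with one flat scan over the raw string
-- keeping an integer row counter: simpler decomposition, same O(n) cost.

-- ===== PORT A =====
def get_all_seats_from_configuration (configuration : String) : List String :=
  -- rows = configuration.split("|"); sep "|" is nonempty so split? is always `some`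
  let rows := (PySem.Str.split? configuration "|").getD []
  (PySem.List.enumerate rows 1).foldl
    (fun result p =>
      let clean := PySem.Str.replace (PySem.Str.replace p.2 "-" "") "*" ""
      clean.toList.foldl
        (fun r c => r ++ [PySem.Int.toStr p.1 ++ String.singleton c]) result)
    []

-- ===== PORT B =====
def get_all_seats_from_configuration_alt (configuration : String) : List String :=
  (configuration.toList.foldl
    (fun (st : Int × List String) c =>
      if c = '|' then (st.1 + 1, st.2)
      else if c = '-' ∨ c = '*' then st  -- `char not in "-*"` negated
      else (st.1, st.2 ++ [PySem.Int.toStr st.1 ++ String.singleton c]))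
    (1, [])).2

-- ===== PRECONDITION & SPEC =====
def Spec_get_all_seats_from_configuration (configuration : String) (out : List String) : Prop := out = get_all_seats_from_configuration_alt configuration
instance (configuration : String) (out : List String) : Decidable (Spec_get_all_seats_from_configuration configuration out) := by unfold Spec_get_all_seats_from_configuration; infer_instance

-- ===== CLAIM (what is proved, stated in full; the proofs are below) =====
def Claim_equal_get_all_seats_from_configuration : Prop := ∀ (configuration : String), Dom_get_all_seats_from_configuration configuration → Spec_get_all_seats_from_configuration configuration (get_all_seats_from_configuration configuration)

-- ===== LEMMAS AND PROOFS =====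

-- the chars that survive A's replace("-","").replace("*","")
def seatOk (c : Char) : Bool := !(c == '*') && !(c == '-')

-- structural version of split-on-'|' with the not-yet-finished row carried reversed
def rowsOf : List Char → List Char → List (List Char)
  | [], cur => [cur.reverse]
  | c :: rest, cur => if c = '|' then cur.reverse :: rowsOf rest [] else rowsOf rest (c :: cur)

-- the seat labels A emits for a finished row
def seats (row : Int) (cs : List Char) : List String :=
  (cs.filter seatOk).map (fun c => PySem.Int.toStr row ++ String.singleton c)

theorem replace_go_filter (d : Char) (l : List Char) (acc : List Char) (fuel : Nat)
    (h : l.length ≤ fuel) :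
    PySem.Chars.replace.go [d] [] fuel l acc = acc.reverse ++ l.filter (fun c => !(c == d)) := by
  induction l generalizing fuel acc with
  | nil => cases fuel <;> simp [PySem.Chars.replace.go]
  | cons c t ih =>
    cases fuel with
    | zero => simp at h
    | succ f =>
      simp only [List.length_cons, Nat.add_le_add_iff_right] at h
      by_cases hc : c = d
      · subst hc
        simp [PySem.Chars.replace.go, List.isPrefixOf, ih _ _ h]
      · simp [PySem.Chars.replace.go, List.isPrefixOf, Ne.symm hc, hc, ih _ _ h]

theorem clean_toList (s : String) :
    (PySem.Str.replace (PySem.Str.replace s "-" "") "*" "").toList = s.toList.filter seatOk := by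
  have h1 : ∀ (l : List Char) (d : Char),
      PySem.Chars.replace l [d] [] = l.filter (fun c => !(c == d)) := by
    intro l d
    show (if ([d] : List Char).isEmpty = true then _ else _) = _
    simpa using replace_go_filter d l [] l.length le_rfl
  simp only [PySem.Str.toList_replace]
  rw [show ("-" : String).toList = ['-'] from rfl, show ("*" : String).toList = ['*'] from rfl,
    show ("" : String).toList = [] from rfl, h1, h1, List.filter_filter]
  rfl

-- A's inner loop over one row, as a plain function of the accumulator
theorem Astep_eq :
    (fun (result : List String) (p : Int × String) =>
      let clean := PySem.Str.replace (PySem.Str.replace p.2 "-" "") "*" ""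
      clean.toList.foldl
        (fun r c => r ++ [PySem.Int.toStr p.1 ++ String.singleton c]) result)
    = fun result p => result ++ seats p.1 p.2.toList := by
  funext result p
  simp only [clean_toList]
  rw [PySem.List.foldl_append_singleton_eq_map (fun c => PySem.Int.toStr p.1 ++ String.singleton c)]
  rfl

theorem seats_append (row : Int) (a b : List Char) :
    seats row (a ++ b) = seats row a ++ seats row b := by
  simp [seats]

theorem splitOn_go_rowsOf (l : List Char) : ∀ (cur : List Char) (acc : List (List Char))
    (fuel : Nat), l.length ≤ fuel →
    PySem.Chars.splitOn.go ['|'] fuel l cur acc = acc.reverse ++ rowsOf l cur := by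
  induction l with
  | nil => intro cur acc fuel _; cases fuel <;> simp [PySem.Chars.splitOn.go, rowsOf]
  | cons c t ih =>
    intro cur acc fuel h
    cases fuel with
    | zero => simp at h
    | succ f =>
      simp only [List.length_cons, Nat.add_le_add_iff_right] at h
      by_cases hc : c = '|'
      · subst hc
        simp [PySem.Chars.splitOn.go, List.isPrefixOf, rowsOf, ih _ _ _ h]
      · simp [PySem.Chars.splitOn.go, List.isPrefixOf, Ne.symm hc, hc, rowsOf, ih _ _ _ h]

theorem splitOn_pipe (l : List Char) :
    PySem.Chars.splitOn l ['|'] = rowsOf l [] := by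
  show PySem.Chars.splitOn.go ['|'] (l.length + 1) l [] [] = _
  simpa using splitOn_go_rowsOf l [] [] (l.length + 1) (by omega)

theorem main_invariant (l : List Char) :
    ∀ (cur : List Char) (row : Int) (acc : List String),
    (PySem.List.enumerate ((rowsOf l cur).map String.ofList) row).foldl
      (fun result p => result ++ seats p.1 p.2.toList) acc
    = (l.foldl
        (fun (st : Int × List String) c =>
          if c = '|' then (st.1 + 1, st.2)
          else if c = '-' ∨ c = '*' then st
          else (st.1, st.2 ++ [PySem.Int.toStr st.1 ++ String.singleton c]))
        (row, acc ++ seats row cur.reverse)).2 := by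
  induction l with
  | nil =>
    intro cur row acc
    simp [rowsOf, PySem.List.enumerate]
  | cons c t ih =>
    intro cur row acc
    by_cases hc : c = '|'
    · subst hc
      rw [show rowsOf ('|' :: t) cur = cur.reverse :: rowsOf t [] from by simp [rowsOf]]
      simp only [List.map_cons, PySem.List.enumerate_cons, List.foldl_cons,
        String.toList_ofList]
      rw [ih [] (row + 1) (acc ++ seats row cur.reverse)]
      simp [seats]
    · rw [show rowsOf (c :: t) cur = rowsOf t (c :: cur) from by simp [rowsOf, hc]]
      rw [ih (c :: cur) row acc]
      by_cases hs : c = '-' ∨ c = '*'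
      · have hok : seatOk c = false := by
          rcases hs with h | h <;> simp [seatOk, h]
        simp only [List.foldl_cons, if_neg hc, if_pos hs, List.reverse_cons, seats_append]
        simp [seats, hok]
      · have hok : seatOk c = true := by
          simp only [not_or] at hs
          simp [seatOk, hs.1, hs.2]
        simp only [List.foldl_cons, if_neg hc, if_neg hs, List.reverse_cons, seats_append]
        simp [seats, hok]

-- ===== VERDICT (by name: the statement is the Claim_ definition above) =====
theorem get_all_seats_from_configuration_spec : Claim_equal_get_all_seats_from_configuration := by
  intro configuration _
  unfold Spec_get_all_seats_from_configuration
  unfold get_all_seats_from_configuration get_all_seats_from_configuration_alt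
  rw [Astep_eq]
  have hsplit : PySem.Str.split? configuration "|"
      = some ((rowsOf configuration.toList []).map String.ofList) := by
    rw [PySem.Str.split?.eq_1, show ("|" : String).toList = ['|'] from rfl]
    simp [PySem.Chars.split?, splitOn_pipe]
  rw [hsplit]
  have := main_invariant configuration.toList [] 1 []
  simpa [seats] using this
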